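-- pv_equiv track=rewrite | github.com/jdbrowndev/hackerrank | algorithms/strings/sherlock-and-anagrams/Solution.py | count_anagrammatic_pairs
-- ===== SOURCE A (Python) =====
-- def count_anagrammatic_pairs(str):
--     anagrams = {}
--     for start in range(len(str)):
--         for end in range(start + 1, len(str) + 1):
--             anagram = "".join(sorted(str[start:end]))
--             if anagram in anagrams:
--                 anagrams[anagram] += 1
--             else:
--                 anagrams[anagram] = 1
--     return sum((int(count*(count - 1)/2) for (str, count) in anagrams.items()))
-- ===== SOURCE B (Python) =====
-- def count_anagrammatic_pairs(str):
--     groups = {}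
--     n = len(str)
--     for start in range(n):
--         cnt = [0] * 128
--         for end in range(start, n):
--             i = ord(str[end])
--             cnt[i] = cnt[i] + 1
--             key = tuple(cnt)
--             groups[key] = groups.get(key, 0) + 1
--     total = 0
--     for c in groups.values():
--         total += c * (c - 1) // 2
--     return total
-- ===== Notes on version B (the rewrite author's own statement) =====
-- stated objective: faster
-- what changed: Replaces sorting every substring (O(len log len) per substring) with a 128-slot character-frequency vector maintained incrementally per start position and used as the grouping key.
import Mathlib
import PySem

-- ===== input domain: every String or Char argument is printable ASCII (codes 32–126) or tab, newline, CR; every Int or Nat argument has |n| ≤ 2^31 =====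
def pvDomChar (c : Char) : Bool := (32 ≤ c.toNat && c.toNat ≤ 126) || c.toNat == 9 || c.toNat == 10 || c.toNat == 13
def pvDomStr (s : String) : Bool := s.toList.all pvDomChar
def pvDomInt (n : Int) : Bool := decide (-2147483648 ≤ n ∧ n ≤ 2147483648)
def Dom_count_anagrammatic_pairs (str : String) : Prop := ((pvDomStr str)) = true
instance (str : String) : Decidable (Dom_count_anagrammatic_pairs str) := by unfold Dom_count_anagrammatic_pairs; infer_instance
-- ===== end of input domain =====

-- B replaces sorting every substring with an incrementally-maintained 128-slot character-frequency
-- vector used as the grouping key (objective: faster, measured).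

-- ===== PORT A =====
-- Python's int(count*(count-1)/2) is ported as integer division: count*(count-1) is even and
-- nonnegative, where float division by 2 followed by int() is exact at the magnitudes involved.
def count_anagrammatic_pairs (str : String) : Int :=
  let cs := str.toList
  let n : Int := PySem.Str.len str
  let anagrams : PySem.Dict String Int :=
    (PySem.List.pyRange 0 n 1).foldl (fun d start =>
      (PySem.List.pyRange (start + 1) (n + 1) 1).foldl (fun d e =>
        let anagram := String.ofList (PySem.List.sorted (PySem.List.slice cs (some start) (some e)) (fun x => x) false)
        if d.contains anagram then d.insert anagram (d.getD anagram 0 + 1)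
        else d.insert anagram 1) d) PySem.Dict.empty
  anagrams.items.foldl (fun acc p => acc + (p.2 * (p.2 - 1)) / 2) 0

-- ===== PORT B =====
-- cnt[ord(str[end])] += 1 is ported with pyGetD/getD/set; every index is in range on the domain
-- (ASCII codes < 128), where this is exact.
def count_anagrammatic_pairs_alt (str : String) : Int :=
  let cs := str.toList
  let n : Int := PySem.Str.len str
  let groups : PySem.Dict (List Int) Int :=
    (PySem.List.pyRange 0 n 1).foldl (fun g start =>
      ((PySem.List.pyRange start n 1).foldl
        (fun (st : List Int × PySem.Dict (List Int) Int) e =>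
          let i := (PySem.List.pyGetD cs e ' ').toNat
          let cnt := st.1.set i (st.1.getD i 0 + 1)
          (cnt, st.2.insert cnt (st.2.getD cnt 0 + 1)))
        (List.replicate 128 (0 : Int), g)).2) PySem.Dict.empty
  groups.values.foldl (fun acc c => acc + PySem.Int.floordiv (c * (c - 1)) 2) 0

-- ===== PRECONDITION & SPEC =====
def Spec_count_anagrammatic_pairs (str : String) (out : Int) : Prop := out = count_anagrammatic_pairs_alt str
instance (str : String) (out : Int) : Decidable (Spec_count_anagrammatic_pairs str out) := by unfold Spec_count_anagrammatic_pairs; infer_instance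

-- ===== CLAIM (what is proved, stated in full; the proofs are below) =====
def Claim_equal_count_anagrammatic_pairs : Prop := ∀ (str : String), Dom_count_anagrammatic_pairs str → Spec_count_anagrammatic_pairs str (count_anagrammatic_pairs str)

-- ===== LEMMAS AND PROOFS =====

/-- C(c,2) as both ports compute it. -/
def pvC (c : Int) : Int := (c * (c - 1)) / 2

/-- The nonempty prefixes of `t`, each preceded by the already-consumed prefix `p`. -/
def pvPfx : List Char → List Char → List (List Char)
  | _, [] => []
  | p, c :: t => (p ++ [c]) :: pvPfx (p ++ [c]) t

/-- All nonempty substrings of `cs`, enumerated as both loops do: by start, then end. -/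
def pvSubs (cs : List Char) : List (List Char) :=
  (List.range cs.length).flatMap (fun s => pvPfx [] (cs.drop s))

/-- A's grouping key: the sorted substring. -/
def pvFA (u : List Char) : String := String.ofList (PySem.List.sorted u (fun x => x) false)

/-- B's grouping key: the 128-slot frequency vector. -/
def pvCvec (u : List Char) : List Int :=
  (List.range 128).map (fun i => (u.countP (fun c => c.toNat == i) : Int))

/-- Number of position-ordered pairs of equal elements. -/
def pvPairs {κ : Type} [BEq κ] : List κ → Nat
  | [] => 0
  | k :: t => t.count k + pvPairs t

/-- Sum of C(multiplicity,2) over the distinct elements of `ys`. -/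
def pvTotal {κ : Type} [BEq κ] (ys : List κ) : Int :=
  ((PySem.Set.ofList ys).map (fun k => pvC ((ys.count k : Nat) : Int))).sum

theorem pvPfx_eq (t p : List Char) :
    pvPfx p t = (List.range t.length).map (fun j => p ++ t.take (j + 1)) := by
  induction t generalizing p with
  | nil => rfl
  | cons c t ih =>
      rw [pvPfx, ih (p ++ [c])]
      simp [List.range_succ_eq_map, List.map_map, Function.comp_def]

/-- A nested loop inserting into one dictionary is a single loop over the concatenation. -/
theorem pvFoldlFoldl {α β δ : Type} (l : List α) (g : α → List β) (f : δ → β → δ) (d : δ) :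
    l.foldl (fun d s => (g s).foldl f d) d = (l.flatMap g).foldl f d := by
  induction l generalizing d with
  | nil => rfl
  | cons x t ih => simp [List.flatMap_cons, List.foldl_append, ih]

/-- Both ports' final pass: summing C(count,2) over the counting dict of a key list. -/
theorem pvFoldTotal {κ : Type} [BEq κ] [LawfulBEq κ] (K : List κ) :
    ((K.foldl (fun d k => d.insert k (d.getD k 0 + 1)) PySem.Dict.empty).items.foldl
      (fun acc p => acc + pvC p.2) 0) = pvTotal K := by
  rw [PySem.Dict.foldl_insert_getD_add_one_eq_counter, PySem.Dict.items_counter]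
  rw [PySem.List.foldl_add (List.map (fun k => (k, (K.count k : Int))) (PySem.Set.ofList K))
    (fun p => pvC p.2) 0]
  simp [pvTotal, List.map_map, Function.comp_def]

/-- A's inner loop visits exactly the sorted nonempty prefixes of the suffix at `s`. -/
theorem pvA_keylist (cs : List Char) (s : Nat) :
    (PySem.List.pyRange ((s : Int) + 1) ((cs.length : Int) + 1) 1).map
        (fun e => pvFA (PySem.List.slice cs (some (s : Int)) (some e)))
      = (pvPfx [] (cs.drop s)).map pvFA := by
  rw [pvPfx_eq, PySem.List.pyRange_one, List.map_map, List.map_map]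
  have hlen : (((cs.length : Int) + 1) - ((s : Int) + 1)).toNat = (cs.drop s).length := by
    simp [List.length_drop]
  rw [hlen]
  apply List.map_congr_left
  intro k _
  simp only [Function.comp_def, List.nil_append]
  congr 1
  have : (s : Int) + 1 + (k : Int) = (s : Int) + ((k + 1 : Nat) : Int) := by push_cast; ring
  rw [this, PySem.List.slice_natCast_add]

theorem pvA_eq (str : String) :
    count_anagrammatic_pairs str = pvTotal ((pvSubs str.toList).map pvFA) := by
  unfold count_anagrammatic_pairs
  simp only [PySem.Str.len_eq]
  have h1 : ∀ (d : PySem.Dict String Int) (k : String),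
      (if d.contains k then d.insert k (d.getD k 0 + 1) else d.insert k 1)
        = d.insert k (d.getD k 0 + 1) := by
    intro d k
    by_cases h : d.contains k
    · simp [h]
    · simp [h, PySem.Dict.getD_of_not_contains d 0 (by simpa using h)]
  simp only [h1]
  have h2 : ∀ (u : List Char), String.ofList (PySem.List.sorted u (fun x => x) false) = pvFA u :=
    fun _ => rfl
  simp only [h2]
  rw [show (fun (d : PySem.Dict String Int) (start : Int) =>
      (PySem.List.pyRange (start + 1) ((str.toList.length : Int) + 1) 1).foldl
        (fun d e => d.insert (pvFA (PySem.List.slice str.toList (some start) (some e)))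
          (d.getD (pvFA (PySem.List.slice str.toList (some start) (some e))) 0 + 1)) d)
    = (fun (d : PySem.Dict String Int) (start : Int) =>
      ((PySem.List.pyRange (start + 1) ((str.toList.length : Int) + 1) 1).map
        (fun e => pvFA (PySem.List.slice str.toList (some start) (some e)))).foldl
        (fun d k => d.insert k (d.getD k 0 + 1)) d)
    from funext fun d => funext fun s =>
      (List.foldl_map (f := fun e => pvFA (PySem.List.slice str.toList (some s) (some e)))
        (g := fun (d : PySem.Dict String Int) (k : String) => d.insert k (d.getD k 0 + 1))).symm]
  rw [pvFoldlFoldl, ← pvFoldTotal]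
  congr 1
  refine congrArg (fun L => (List.foldl (fun (d : PySem.Dict String Int) k => d.insert k (d.getD k 0 + 1)) PySem.Dict.empty L).items) ?_
  rw [pvSubs, List.map_flatMap, PySem.List.pyRange_zero_natCast, List.flatMap_map]
  exact congrArg (fun (F : Nat → List String) => List.flatMap F (List.range str.toList.length))
    (funext fun s => pvA_keylist str.toList s)

theorem pvCvec_getD (p : List Char) (i : Nat) (hi : i < 128) :
    (pvCvec p).getD i 0 = (p.countP (fun x => x.toNat == i) : Int) := by
  unfold pvCvec
  rw [List.getD_eq_getElem?_getD, List.getElem?_map, List.getElem?_range hi]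
  rfl

/-- B's in-place increment is exactly the frequency vector of the one-longer prefix. -/
theorem pvBump (p : List Char) (c : Char) (hc : c.toNat < 128) :
    (pvCvec p).set c.toNat ((pvCvec p).getD c.toNat 0 + 1) = pvCvec (p ++ [c]) := by
  rw [pvCvec_getD p c.toNat hc]
  apply List.ext_getElem
  · simp [pvCvec]
  · intro j h1 h2
    simp only [pvCvec, List.length_map, List.length_range] at h2 ⊢
    have hj : j < 128 := by simpa using h2
    rw [List.getElem_set]
    simp only [List.getElem_map, List.getElem_range, List.countP_append]
    by_cases hjc : c.toNat = j
    · subst hjc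
      simp
    · have h0 : List.countP (fun x => x.toNat == j) [c] = 0 := by simp [hjc]
      simp [if_neg hjc, h0]

theorem pvCvec_nil : pvCvec [] = List.replicate 128 (0 : Int) := by
  unfold pvCvec
  simp [List.map_const']

/-- B's inner loop: the dict receives exactly the frequency vectors of the nonempty prefixes. -/
theorem pvInner (t : List Char) (h : ∀ c ∈ t, c.toNat < 128) :
    ∀ (p : List Char) (g : PySem.Dict (List Int) Int),
    (t.foldl (fun (st : List Int × PySem.Dict (List Int) Int) c =>
        let i := c.toNat
        let cnt := st.1.set i (st.1.getD i 0 + 1)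
        (cnt, st.2.insert cnt (st.2.getD cnt 0 + 1))) (pvCvec p, g)).2
    = ((pvPfx p t).map pvCvec).foldl (fun d k => d.insert k (d.getD k 0 + 1)) g := by
  induction t with
  | nil => intro p g; rfl
  | cons c t ih =>
      intro p g
      simp only [List.foldl_cons, pvPfx, List.map_cons]
      rw [show ((pvCvec p).set c.toNat ((pvCvec p).getD c.toNat 0 + 1)) = pvCvec (p ++ [c])
        from pvBump p c (h c List.mem_cons_self)]
      exact ih (fun x hx => h x (List.mem_cons_of_mem _ hx)) (p ++ [c]) _

theorem pvB_eq (str : String) (hchars : ∀ c ∈ str.toList, c.toNat < 128) :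
    count_anagrammatic_pairs_alt str = pvTotal ((pvSubs str.toList).map pvCvec) := by
  unfold count_anagrammatic_pairs_alt
  simp only [PySem.Str.len_eq]
  have hstep : ∀ (g : PySem.Dict (List Int) Int), ∀ start ∈ PySem.List.pyRange 0 ((str.toList.length : Int)) 1,
      ((PySem.List.pyRange start ((str.toList.length : Int)) 1).foldl
        (fun (st : List Int × PySem.Dict (List Int) Int) e =>
          let i := (PySem.List.pyGetD str.toList e ' ').toNat
          let cnt := st.1.set i (st.1.getD i 0 + 1)
          (cnt, st.2.insert cnt (st.2.getD cnt 0 + 1)))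
        (List.replicate 128 (0 : Int), g)).2
      = ((pvPfx [] (str.toList.drop start.toNat)).map pvCvec).foldl
          (fun d k => d.insert k (d.getD k 0 + 1)) g := by
    intro g start hstart
    have h0 : (0 : Int) ≤ start := (PySem.List.mem_pyRange_one.mp hstart).1
    rw [← pvCvec_nil]
    rw [PySem.List.foldl_pyRange_pyGetD' str.toList ' '
      (fun (st : List Int × PySem.Dict (List Int) Int) c =>
        let i := c.toNat
        let cnt := st.1.set i (st.1.getD i 0 + 1)
        (cnt, st.2.insert cnt (st.2.getD cnt 0 + 1))) (pvCvec [], g) h0]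
    exact pvInner (str.toList.drop start.toNat)
      (fun c hc => hchars c (List.mem_of_mem_drop hc)) [] g
  rw [PySem.List.foldl_congr_mem _ _
    (fun (g : PySem.Dict (List Int) Int) (start : Int) =>
      ((pvPfx [] (str.toList.drop start.toNat)).map pvCvec).foldl
        (fun d k => d.insert k (d.getD k 0 + 1)) g)
    PySem.Dict.empty hstep]
  rw [pvFoldlFoldl]
  have hdiv : ∀ (x : Int), PySem.Int.floordiv (x * (x - 1)) 2 = pvC x :=
    fun x => PySem.Int.floordiv_eq_ediv_of_pos (by norm_num)
  simp only [hdiv, PySem.Dict.values]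
  rw [List.foldl_map, pvFoldTotal]
  congr 1
  rw [pvSubs, List.map_flatMap, PySem.List.pyRange_zero_natCast, List.flatMap_map]
  exact congrArg (fun (F : Nat → List (List Int)) => List.flatMap F (List.range str.toList.length))
    (funext fun s => by simp)

theorem pvCharToNat_inj : Function.Injective Char.toNat := by
  intro a b h
  exact Char.ext (by exact UInt32.toNat_inj.mp h)

/-- For ASCII content, equal frequency vectors mean permuted substrings, and conversely. -/
theorem pvCvec_eq_iff (u v : List Char) (hu : ∀ c ∈ u, c.toNat < 128) (hv : ∀ c ∈ v, c.toNat < 128) :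
    pvCvec u = pvCvec v ↔ u.Perm v := by
  constructor
  · intro h
    rw [List.perm_iff_count]
    intro c
    by_cases hc : c.toNat < 128
    · have h1 : ∀ w : List Char, w.count c = w.countP (fun x => x.toNat == c.toNat) := by
        intro w
        rw [List.count, List.countP_congr]
        intro x _
        constructor
        · intro hx; simp only [beq_iff_eq] at hx ⊢; exact hx ▸ rfl
        · intro hx; simp only [beq_iff_eq] at hx ⊢; exact pvCharToNat_inj hx
      have := congrArg (fun l => l[c.toNat]?) h
      simp only [pvCvec, List.getElem?_map, List.getElem?_range hc, Option.map_some] at this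
      rw [h1, h1]
      exact_mod_cast Option.some.inj this
    · have h0 : u.count c = 0 := by
        rw [List.count_eq_zero]; intro hmem; exact hc (hu c hmem)
      have h0' : v.count c = 0 := by
        rw [List.count_eq_zero]; intro hmem; exact hc (hv c hmem)
      rw [h0, h0']
  · intro h
    unfold pvCvec
    apply List.map_congr_left
    intro i _
    exact congrArg Int.ofNat (h.countP_eq _)

/-- The two grouping keys induce the same classes on ASCII substrings. -/
theorem pvKey_iff (u v : List Char) (hu : ∀ c ∈ u, c.toNat < 128) (hv : ∀ c ∈ v, c.toNat < 128) :
    pvFA u = pvFA v ↔ pvCvec u = pvCvec v := by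
  rw [pvCvec_eq_iff u v hu hv]
  unfold pvFA
  rw [show ∀ a b : List Char, String.ofList a = String.ofList b ↔ a = b by
    intro a b; exact ⟨fun h => by simpa using congrArg String.toList h, congrArg _⟩]
  exact PySem.List.sorted_id_eq_sorted_id_iff_perm (xs := u) (ys := v)

theorem pvSubs_chars (cs : List Char) (u : List Char) (hu : u ∈ pvSubs cs) :
    ∀ c ∈ u, c ∈ cs := by
  intro c hc
  unfold pvSubs at hu
  obtain ⟨s, hs, hmem⟩ := List.mem_flatMap.mp hu
  rw [pvPfx_eq] at hmem
  obtain ⟨j, hj, rfl⟩ := List.mem_map.mp hmem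
  simp only [List.nil_append] at hc
  exact List.mem_of_mem_drop (List.mem_of_mem_take hc)

/-- Counting equal pairs is invariant under replacing the key by an equivalent one. -/
theorem pvPairs_map_congr {α κ₁ κ₂ : Type} [BEq κ₁] [LawfulBEq κ₁] [BEq κ₂] [LawfulBEq κ₂]
    (xs : List α) (f : α → κ₁) (g : α → κ₂)
    (h : ∀ u ∈ xs, ∀ v ∈ xs, (f u = f v ↔ g u = g v)) :
    pvPairs (xs.map f) = pvPairs (xs.map g) := by
  induction xs with
  | nil => rfl
  | cons x t ih =>
      simp only [List.map_cons, pvPairs]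
      have hcount : ∀ {κ : Type} [BEq κ] [LawfulBEq κ] (k : α → κ),
          (t.map k).count (k x) = t.countP (fun y => k y == k x) := by
        intro κ _ _ k
        rw [List.count, List.countP_map]
        rfl
      rw [hcount f, hcount g, ih (fun u hu v hv => h u (List.mem_cons_of_mem _ hu) v (List.mem_cons_of_mem _ hv)),
        List.countP_congr]
      intro y hy
      have hiff := h y (List.mem_cons_of_mem _ hy) x List.mem_cons_self
      by_cases hfy : f y = f x
      · simp [hfy, hiff.mp hfy]
      · simp [beq_eq_false_iff_ne.mpr hfy, beq_eq_false_iff_ne.mpr (fun hg => hfy (hiff.mpr hg))]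

theorem pvPairs_append {κ : Type} [BEq κ] [LawfulBEq κ] (ys : List κ) (y : κ) :
    pvPairs (ys ++ [y]) = pvPairs ys + ys.count y := by
  induction ys with
  | nil => simp [pvPairs]
  | cons x t ih =>
      simp only [List.cons_append, pvPairs, ih, List.count_append, List.count_cons]
      by_cases hxy : y = x <;> simp [hxy, beq_iff_eq, Ne.symm] <;> omega

theorem pvC_succ (c : Nat) : pvC ((c : Nat) + 1 : Int) = pvC (c : Int) + c := by
  unfold pvC
  have : ((c : Int) + 1) * ((c : Int) + 1 - 1) = (c : Int) * ((c : Int) - 1) + c * 2 := by ring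
  rw [this, Int.add_mul_ediv_right _ _ (by norm_num)]

/-- Changing a summand at one key of a duplicate-free key list shifts the sum by its change. -/
theorem pvMapSum_update {κ : Type} [BEq κ] [LawfulBEq κ] (s : List κ) (F F' : κ → Int) (y : κ)
    (hnd : s.Nodup) (hy : y ∈ s) (hne : ∀ k ∈ s, k ≠ y → F' k = F k) :
    (s.map F').sum = (s.map F).sum + (F' y - F y) := by
  induction s with
  | nil => cases hy
  | cons x t ih =>
      simp only [List.map_cons, List.sum_cons]
      rcases List.mem_cons.mp hy with rfl | hyt
      · have : ∀ k ∈ t, F' k = F k := fun k hk =>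
          hne k (List.mem_cons_of_mem _ hk) (fun hkx => (List.nodup_cons.mp hnd).1 (hkx ▸ hk))
        rw [List.map_congr_left this]
        ring
      · have hxy : x ≠ y := fun hxe => (List.nodup_cons.mp hnd).1 (hxe ▸ hyt)
        rw [hne x List.mem_cons_self hxy,
          ih (List.nodup_cons.mp hnd).2 hyt (fun k hk => hne k (List.mem_cons_of_mem _ hk))]
        ring

/-- Summing C(multiplicity,2) over the distinct keys counts the equal pairs. -/
theorem pvTotal_eq_pairs {κ : Type} [BEq κ] [LawfulBEq κ] (ys : List κ) :
    pvTotal ys = (pvPairs ys : Int) := by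
  induction ys using List.reverseRecOn with
  | nil => rfl
  | append_singleton t y ih =>
      unfold pvTotal at ih ⊢
      rw [pvPairs_append]
      have hset : PySem.Set.ofList (t ++ [y]) = PySem.Set.add (PySem.Set.ofList t) y := by
        rw [PySem.Set.ofList_eq_foldl, PySem.Set.ofList_eq_foldl, List.foldl_append]
        rfl
      by_cases hmem : y ∈ t
      · have hadd : PySem.Set.add (PySem.Set.ofList t) y = PySem.Set.ofList t := by
          unfold PySem.Set.add
          simp [PySem.Set.contains, (PySem.Set.mem_ofList t y).mpr hmem]
        rw [hset, hadd]
        rw [pvMapSum_update (PySem.Set.ofList t)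
            (fun k => pvC ((t.count k : Nat) : Int))
            (fun k => pvC (((t ++ [y]).count k : Nat) : Int)) y
            (PySem.Set.nodup_ofList t) ((PySem.Set.mem_ofList t y).mpr hmem) ?_]
        · rw [ih]
          have hc : (t ++ [y]).count y = t.count y + 1 := by
            simp [List.count_append]
          rw [hc]
          push_cast [pvC_succ]
          ring
        · intro k _ hk
          have hc0 : List.count k [y] = 0 := List.count_eq_zero.mpr (by simp [hk])
          simp [List.count_append, hc0]
      · have hadd : PySem.Set.add (PySem.Set.ofList t) y = PySem.Set.ofList t ++ [y] := by
          unfold PySem.Set.add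
          simp [PySem.Set.contains, hmem]
        rw [hset, hadd, List.map_append, List.sum_append]
        have hcnt0 : t.count y = 0 := List.count_eq_zero.mpr hmem
        have hmapeq : (PySem.Set.ofList t).map (fun k => pvC (((t ++ [y]).count k : Nat) : Int))
            = (PySem.Set.ofList t).map (fun k => pvC ((t.count k : Nat) : Int)) := by
          apply List.map_congr_left
          intro k hk
          have hky : k ≠ y := fun he => hmem (he ▸ (PySem.Set.mem_ofList t k).mp hk)
          have hc0 : List.count k [y] = 0 := List.count_eq_zero.mpr (by simp [hky])
          simp [List.count_append, hc0]
        rw [hmapeq, ih, hcnt0]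
        simp [pvC, hcnt0]

-- ===== VERDICT (by name: the statement is the Claim_ definition above) =====
theorem count_anagrammatic_pairs_spec : Claim_equal_count_anagrammatic_pairs := by
  intro str hdom
  unfold Spec_count_anagrammatic_pairs
  have hchars : ∀ c ∈ str.toList, c.toNat < 128 := by
    intro c hmem
    have := List.all_eq_true.mp hdom c hmem
    unfold pvDomChar at this
    simp only [Bool.or_eq_true, Bool.and_eq_true, decide_eq_true_eq, beq_iff_eq] at this
    omega
  have hsub : ∀ u ∈ pvSubs str.toList, ∀ c ∈ u, c.toNat < 128 :=
    fun u hu c hc => hchars c (pvSubs_chars str.toList u hu c hc)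
  rw [pvA_eq, pvB_eq str hchars, pvTotal_eq_pairs, pvTotal_eq_pairs,
    pvPairs_map_congr (pvSubs str.toList) pvFA pvCvec
      (fun u hu v hv => pvKey_iff u v (hsub u hu) (hsub v hv))]
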